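-- pv_equiv track=rewrite | github.com/splatpope/KNIFER | src/knifer/config/utils.py | disc_features
-- ===== SOURCE A (Python) =====
-- def disc_features(
--         n_layers: int,
--         base_features: int,
--         features_list: "list[int]" = None
--     ) -> "list[int]":
--     """Derive list of features for generator tail layers.
--
--     Args:
--         n_layers (int): Amount of tail layers.
--         base_features (int): Base amount of features.
--             (i.e. in_c of the first mid layer)
--         feature_list (list[int], optional): List of in_c for the tail layers.
--             If missing, every layer will have double the preceding layer's features.
--             Defaults to None.
--     """
--
--     if not features_list:
--         features_list = [base_features]
--     assert features_list[0] == base_features, "Bogus features list."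
--     adds = [features_list[-1] * 2**(i+1) for i in range(n_layers - len(features_list))]
--     return features_list + adds
-- ===== SOURCE B (Python) =====
-- def disc_features(
--         n_layers: int,
--         base_features: int,
--         features_list: "list[int]" = None
--     ) -> "list[int]":
--     if not features_list:
--         features_list = [base_features]
--     assert features_list[0] == base_features, "Bogus features list."
--     out = list(features_list)
--     while len(out) < n_layers:
--         out.append(out[-1] * 2)
--     return out
-- ===== Notes on version B (the rewrite author's own statement) =====
-- stated objective: alternative
-- what changed: Replaces the independent-power comprehension plus concatenation by a single grow-until-long-enough while loop that repeatedly appends double of the current last element to a copy of the list.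
-- outside the precondition, e.g. on disc_features(3, 4, [5, 6]): A raises AssertionError, B raises AssertionError
import Mathlib
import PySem

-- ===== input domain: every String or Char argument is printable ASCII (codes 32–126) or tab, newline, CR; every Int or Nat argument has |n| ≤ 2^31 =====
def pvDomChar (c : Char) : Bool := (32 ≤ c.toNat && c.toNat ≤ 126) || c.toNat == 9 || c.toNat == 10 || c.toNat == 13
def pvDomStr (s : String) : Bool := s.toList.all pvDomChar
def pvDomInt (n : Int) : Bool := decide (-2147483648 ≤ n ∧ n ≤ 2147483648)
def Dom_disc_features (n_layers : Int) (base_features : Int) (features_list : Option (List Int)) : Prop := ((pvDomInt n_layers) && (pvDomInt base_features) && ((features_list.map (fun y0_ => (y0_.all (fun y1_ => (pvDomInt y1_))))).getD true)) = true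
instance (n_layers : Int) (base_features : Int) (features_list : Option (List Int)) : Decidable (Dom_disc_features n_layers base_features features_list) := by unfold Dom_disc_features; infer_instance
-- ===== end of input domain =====

-- B replaces the power comprehension + concatenation by a grow-until-long-enough loop
-- that appends double of the current last element; objective: alternative decomposition.

-- ===== PORT A =====
-- `if not features_list` guard: None or [] is replaced by [base_features]
def disc_features (n_layers : Int) (base_features : Int) (features_list : Option (List Int)) : List Int :=
  let fl : List Int :=
    match features_list with
    | none => [base_features]
    | some l => if l = [] then [base_features] else l
  -- the assert is handled by Pre_disc_features
  -- features_list[-1]: fl is nonempty by construction, so pyGet? always returns; getD 0 is exact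
  let last : Int := (PySem.List.pyGet? fl (-1)).getD 0
  fl ++ (PySem.List.pyRange 0 (n_layers - (fl.length : Int)) 1).map
            (fun i => last * 2 ^ (i + 1).toNat)

-- ===== PORT B =====
-- the `while len(out) < n_layers: out.append(out[-1] * 2)` loop, recursion on the gap
def grow (n_layers : Int) (out : List Int) : List Int :=
  if _h : (out.length : Int) < n_layers then
    grow n_layers (out ++ [(PySem.List.pyGet? out (-1)).getD 0 * 2])
  else out
termination_by (n_layers - out.length).toNat
decreasing_by simp only [List.length_append, List.length_cons, List.length_nil]; omega

def disc_features_alt (n_layers : Int) (base_features : Int) (features_list : Option (List Int)) : List Int :=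
  let out : List Int :=
    match features_list with
    | none => [base_features]
    | some l => if l = [] then [base_features] else l
  grow n_layers out

-- ===== PRECONDITION & SPEC =====
-- Pre_ excludes exactly the inputs where A's assert raises: a nonempty features_list whose head ≠ base_features.
def Pre_disc_features (n_layers : Int) (base_features : Int) (features_list : Option (List Int)) : Prop :=
  (features_list.getD []) = [] ∨ (features_list.getD []).head? = some base_features
instance (n_layers : Int) (base_features : Int) (features_list : Option (List Int)) : Decidable (Pre_disc_features n_layers base_features features_list) := by unfold Pre_disc_features; infer_instance

def pvWitness_disc_features : Int × Int × Option (List Int) := (4, 3, some [3, 6])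

def Spec_disc_features (n_layers : Int) (base_features : Int) (features_list : Option (List Int)) (out : List Int) : Prop := out = disc_features_alt n_layers base_features features_list
instance (n_layers : Int) (base_features : Int) (features_list : Option (List Int)) (out : List Int) : Decidable (Spec_disc_features n_layers base_features features_list out) := by unfold Spec_disc_features; infer_instance

-- ===== CLAIM (what is proved, stated in full; the proofs are below) =====
def Claim_equal_disc_features : Prop := ∀ (n_layers : Int) (base_features : Int) (features_list : Option (List Int)), Dom_disc_features n_layers base_features features_list → Pre_disc_features n_layers base_features features_list → Spec_disc_features n_layers base_features features_list (disc_features n_layers base_features features_list)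

-- ===== LEMMAS AND PROOFS =====
theorem grow_eq_append (t : Int) (fl : List Int) (x : Int) (k : Nat)
    (hk : k = (t - (fl.length + 1 : Nat)).toNat) :
    grow t (fl ++ [x]) = fl ++ [x] ++ (List.range k).map (fun j => x * 2 ^ (j + 1)) := by
  induction k generalizing fl x with
  | zero =>
    rw [grow]
    have : ¬ (((fl ++ [x]).length : Int) < t) := by
      simp only [List.length_append, List.length_cons, List.length_nil]; omega
    rw [dif_neg this]
    simp
  | succ k ih =>
    rw [grow]
    have hlt : (((fl ++ [x]).length : Int) < t) := by
      simp only [List.length_append, List.length_cons, List.length_nil]; omega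
    rw [dif_pos hlt]
    rw [PySem.List.pyGet?_neg_one_append_singleton]
    simp only [Option.getD_some]
    rw [ih (fl ++ [x]) (x * 2) (by simp; omega), List.range_succ_eq_map]
    simp only [List.append_assoc, List.map_cons, List.map_map, List.cons_append,
      List.nil_append]
    refine congrArg _ (congrArg _ ?_)
    refine congrArg₂ _ (by ring) ?_
    apply List.map_congr_left
    intro j _
    simp only [Function.comp_apply, Nat.succ_eq_add_one, pow_succ]
    ring

theorem grow_eq_of_ne_nil (t : Int) (fl : List Int) (hne : fl ≠ []) :
    grow t fl = fl ++ (List.range (t - (fl.length : Int)).toNat).map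
      (fun j => ((PySem.List.pyGet? fl (-1)).getD 0) * 2 ^ (j + 1)) := by
  obtain h | ⟨pre, x, rfl⟩ := List.eq_nil_or_concat fl
  · exact absurd h hne
  simp only [List.concat_eq_append]
  rw [PySem.List.pyGet?_neg_one_append_singleton]
  have := grow_eq_append t pre x (t - ((pre ++ [x]).length : Int)).toNat (by simp)
  simpa using this

theorem adds_eq_range (last : Int) (k : Int) :
    (PySem.List.pyRange 0 k 1).map (fun i => last * 2 ^ (i + 1).toNat) =
      (List.range k.toNat).map (fun j => last * 2 ^ (j + 1)) := by
  rw [PySem.List.pyRange_one, List.map_map]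
  have hk : (k - 0).toNat = k.toNat := by omega
  rw [hk]
  apply List.map_congr_left
  intro j _
  simp [Function.comp]

-- ===== VERDICT (by name: the statement is the Claim_ definition above) =====
theorem disc_features_main (n : Int) (m : List Int) (hne : m ≠ []) :
    m ++ (PySem.List.pyRange 0 (n - (m.length : Int)) 1).map
        (fun i => ((PySem.List.pyGet? m (-1)).getD 0) * 2 ^ (i + 1).toNat) = grow n m := by
  rw [grow_eq_of_ne_nil n m hne, adds_eq_range]

theorem disc_features_spec : Claim_equal_disc_features := by
  intro n b fl _ _
  unfold Spec_disc_features disc_features disc_features_alt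
  cases fl with
  | none => exact disc_features_main n [b] (by simp)
  | some l =>
    by_cases h : l = []
    · simp only [h, reduceIte]
      exact disc_features_main n [b] (by simp)
    · simp only [if_neg h]
      exact disc_features_main n l h
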